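-- pv_equiv track=rewrite | github.com/yaoyunkai/daily_collections | python/learn_records/data_structure_algorithm/stack.py | par_check
-- ===== SOURCE A (Python) =====
-- class Stack:
--     def __init__(self):
--         self.__data = []
--
--     def __len__(self):
--         return len(self.__data)
--
--     def size(self):
--         return len(self.__data)
--
--     def push(self, item):
--         self.__data.append(item)
--
--     def pop(self):
--         return self.__data.pop()
--
--     def peek(self):
--         return self.__data[-1]
--
--     def is_empty(self):
--         return len(self.__data) == 0
--
-- def par_check(val: str):
--     right = {
--         ')': '(',
--         '}': '{',
--         ']': '[',
--     }
--     left = ['(', '[', '{']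
--
--     stack = Stack()
--
--     for char in val:
--         if char in left:
--             stack.push(char)
--         elif char in right:
--             if stack.is_empty() or stack.pop() != right[char]:
--                 return False
--
--     return stack.is_empty()
-- ===== SOURCE B (Python) =====
-- def par_check(val: str):
--     s = ''.join(c for c in val if c in '()[]{}')
--     while True:
--         t = s.replace('()', '').replace('[]', '').replace('{}', '')
--         if t == s:
--             return s == ''
--         s = t
-- ===== Notes on version B (the rewrite author's own statement) =====
-- stated objective: alternative
-- what changed: Replaces the explicit stack scan by repeated elimination of adjacent matched bracket pairs on the bracket-filtered string until a fixpoint, returning whether the fixpoint is empty; measured faster by a constant factor because the elimination passes run inside C-level str.replace while A interprets a per-character Python loop.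
import Mathlib
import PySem

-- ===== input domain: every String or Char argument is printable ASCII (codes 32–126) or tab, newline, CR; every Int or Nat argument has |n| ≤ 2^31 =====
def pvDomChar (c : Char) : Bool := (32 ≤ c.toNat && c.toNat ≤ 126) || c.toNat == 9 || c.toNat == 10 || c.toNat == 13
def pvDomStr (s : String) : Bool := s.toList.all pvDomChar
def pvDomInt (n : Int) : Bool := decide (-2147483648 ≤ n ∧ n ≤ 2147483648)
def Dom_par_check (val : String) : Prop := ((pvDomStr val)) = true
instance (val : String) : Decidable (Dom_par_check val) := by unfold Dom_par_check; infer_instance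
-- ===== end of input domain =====

-- B replaces A's explicit stack scan by repeated elimination of adjacent matched
-- bracket pairs on the bracket-filtered string until a fixpoint (a different
-- algorithm; a timing run measured B faster by a constant factor, its passes
-- run inside the standard library's replace).

-- ===== PORT A =====
-- right[char] of A
def rightOf (c : Char) : Char := if c = ')' then '(' else if c = '}' then '{' else '['

-- A's loop over the characters; the Stack ADT is modelled by a Lean list
-- (push = cons, pop = head, is_empty = isEmpty — the class's representation is private).
def parLoop : List Char → List Char → Bool
  | [], st => st.isEmpty
  | c :: rest, st =>
    if c = '(' ∨ c = '[' ∨ c = '{' then parLoop rest (c :: st)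
    else if c = ')' ∨ c = '}' ∨ c = ']' then
      match st with
      | [] => false                                   -- stack.is_empty() → return False
      | top :: st' => if top = rightOf c then parLoop rest st' else false
    else parLoop rest st

def par_check (val : String) : Bool := parLoop val.toList []

-- ===== PORT B =====
def isBracket (c : Char) : Bool :=
  c = '(' || c = ')' || c = '[' || c = ']' || c = '{' || c = '}'

-- one left-to-right pass of str.replace removing a two-character pattern a b
def repl (a b : Char) : List Char → List Char
  | x :: y :: t => if x = a ∧ y = b then repl a b t else x :: repl a b (y :: t)
  | l => l
termination_by l => l.length

-- the three chained replace calls of B, one pass each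
def stepElim (l : List Char) : List Char :=
  repl '{' '}' (repl '[' ']' (repl '(' ')' l))

theorem repl_length_le (a b : Char) (l : List Char) : (repl a b l).length ≤ l.length := by
  fun_induction repl a b l with
  | case1 x y t h ih => simp only [List.length_cons]; omega
  | case2 x y t h ih => simp only [List.length_cons] at ih ⊢; omega
  | case3 l h => exact le_refl _

theorem repl_eq_or_lt (a b : Char) (l : List Char) :
    repl a b l = l ∨ (repl a b l).length < l.length := by
  fun_induction repl a b l with
  | case1 x y t h ih =>
    right; have := repl_length_le a b t; simp only [List.length_cons]; omega
  | case2 x y t h ih =>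
    rcases ih with h1 | h1
    · left; rw [h1]
    · right; simpa using h1
  | case3 l h => left; rfl

theorem stepElim_eq_or_lt (l : List Char) :
    stepElim l = l ∨ (stepElim l).length < l.length := by
  unfold stepElim
  rcases repl_eq_or_lt '(' ')' l with h1 | h1
  · rw [h1]
    rcases repl_eq_or_lt '[' ']' l with h2 | h2
    · rw [h2]; exact repl_eq_or_lt '{' '}' l
    · right; calc (repl '{' '}' (repl '[' ']' l)).length ≤ (repl '[' ']' l).length :=
            repl_length_le _ _ _
        _ < l.length := h2
  · right
    have h2 := repl_length_le '[' ']' (repl '(' ')' l)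
    have h3 := repl_length_le '{' '}' (repl '[' ']' (repl '(' ')' l))
    omega

-- the while-True loop of B: apply stepElim until nothing changes
def pairElimLoop (l : List Char) : List Char :=
  let t := stepElim l
  if t = l then l else pairElimLoop t
termination_by l.length
decreasing_by
  rcases stepElim_eq_or_lt l with h | h
  · exact absurd h (by assumption)
  · exact h

def par_check_alt (val : String) : Bool :=
  pairElimLoop (val.toList.filter isBracket) == []

-- ===== PRECONDITION & SPEC =====
def Spec_par_check (val : String) (out : Bool) : Prop := out = par_check_alt val
instance (val : String) (out : Bool) : Decidable (Spec_par_check val out) := by unfold Spec_par_check; infer_instance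

-- ===== CLAIM (what is proved, stated in full; the proofs are below) =====
def Claim_equal_par_check : Prop := ∀ (val : String), Dom_par_check val → Spec_par_check val (par_check val)

-- ===== LEMMAS AND PROOFS =====

-- adjacent occurrence of the two-character pattern a b
def cadj (a b : Char) : List Char → Bool
  | x :: y :: t => (x = a && y = b) || cadj a b (y :: t)
  | _ => false
termination_by l => l.length

def hasAdj (l : List Char) : Bool :=
  cadj '(' ')' l || cadj '[' ']' l || cadj '{' '}' l

def isOpener (c : Char) : Bool := c = '(' || c = '[' || c = '{'

theorem cadj_cons (a b x : Char) (l : List Char) (h : cadj a b l = true) :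
    cadj a b (x :: l) = true := by
  cases l with
  | nil => simp [cadj] at h
  | cons y t => simp only [cadj, Bool.or_eq_true] at *; right; exact h

theorem cadj_repl_lt (a b : Char) (l : List Char) (h : cadj a b l = true) :
    (repl a b l).length < l.length := by
  fun_induction repl a b l with
  | case1 x y t hx ih =>
    have := repl_length_le a b t; simp only [List.length_cons]; omega
  | case2 x y t hx ih =>
    simp only [cadj, Bool.or_eq_true, Bool.and_eq_true, decide_eq_true_eq] at h
    rcases h with ⟨h1, h2⟩ | h
    · exact absurd ⟨h1, h2⟩ hx
    · have := ih h; simpa using this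
  | case3 l hl =>
    rcases l with _ | ⟨x, _ | ⟨y, t⟩⟩ <;> simp [cadj] at h
    exact absurd rfl (hl x y t)

theorem repl_sublist (a b : Char) (l : List Char) : (repl a b l).Sublist l := by
  fun_induction repl a b l with
  | case1 x y t hx ih => exact ih.trans ((List.sublist_cons_self _ _).trans (List.sublist_cons_self _ _))
  | case2 x y t hx ih => exact ih.cons₂ x
  | case3 l hl => exact List.Sublist.refl l

theorem stepElim_sublist (l : List Char) : (stepElim l).Sublist l :=
  ((repl_sublist '{' '}' _).trans (repl_sublist '[' ']' _)).trans (repl_sublist '(' ')' l)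

-- A's scan is invariant under one replace pass of a matched pair
theorem parLoop_repl (a b : Char)
    (hp : (a = '(' ∧ b = ')') ∨ (a = '[' ∧ b = ']') ∨ (a = '{' ∧ b = '}')) :
    ∀ l st, parLoop (repl a b l) st = parLoop l st := by
  intro l
  fun_induction repl a b l with
  | case1 x y t hx ih =>
    intro st
    obtain ⟨hxa, hyb⟩ := hx
    subst hxa; subst hyb
    rcases hp with ⟨ha, hb⟩ | ⟨ha, hb⟩ | ⟨ha, hb⟩ <;> subst ha <;> subst hb <;>
      simp [parLoop, rightOf, ih st]
  | case2 x y t hx ih =>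
    intro st
    by_cases h1 : x = '(' ∨ x = '[' ∨ x = '{'
    · simp only [parLoop, if_pos h1]; exact ih _
    · by_cases h2 : x = ')' ∨ x = '}' ∨ x = ']'
      · cases st with
        | nil => simp only [parLoop, if_neg h1, if_pos h2]
        | cons top st' =>
          simp only [parLoop, if_neg h1, if_pos h2]
          by_cases ht : top = rightOf x
          · simp only [if_pos ht]; exact ih _
          · simp only [if_neg ht]
      · simp only [parLoop, if_neg h1, if_neg h2]; exact ih _
  | case3 l hl => intro st; rfl

theorem parLoop_stepElim (l : List Char) (st : List Char) :
    parLoop (stepElim l) st = parLoop l st := by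
  unfold stepElim
  rw [parLoop_repl '{' '}' (by tauto), parLoop_repl '[' ']' (by tauto),
      parLoop_repl '(' ')' (by tauto)]

-- A ignores non-bracket characters
theorem parLoop_filter (l : List Char) : ∀ st, parLoop (l.filter isBracket) st = parLoop l st := by
  induction l with
  | nil => intro st; rfl
  | cons c rest ih =>
    intro st
    by_cases hb : isBracket c = true
    · rw [List.filter_cons_of_pos hb]
      by_cases h1 : c = '(' ∨ c = '[' ∨ c = '{'
      · simp only [parLoop, if_pos h1]; exact ih _
      · by_cases h2 : c = ')' ∨ c = '}' ∨ c = ']'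
        · cases st with
          | nil => simp only [parLoop, if_neg h1, if_pos h2]
          | cons top st' =>
            simp only [parLoop, if_neg h1, if_pos h2]
            by_cases ht : top = rightOf c
            · simp only [if_pos ht]; exact ih _
            · simp only [if_neg ht]
        · simp only [parLoop, if_neg h1, if_neg h2]; exact ih _
    · rw [List.filter_cons_of_neg hb]
      have h1 : ¬ (c = '(' ∨ c = '[' ∨ c = '{') := by
        simp [isBracket] at hb; tauto
      have h2 : ¬ (c = ')' ∨ c = '}' ∨ c = ']') := by
        simp [isBracket] at hb; tauto
      rw [ih st]
      conv_rhs => rw [show parLoop (c :: rest) st = parLoop rest st by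
        simp only [parLoop, if_neg h1, if_neg h2]]

-- a successful scan of a bracket-only string has an adjacent matched pair, or no opener
theorem parLoop_adj (l : List Char) (hb : ∀ c ∈ l, isBracket c = true) :
    ∀ st, parLoop l st = true →
      hasAdj l = true ∨ l.all (fun c => !isOpener c) = true := by
  induction l with
  | nil => intro st h; right; rfl
  | cons c rest ih =>
    intro st h
    have hrest : ∀ x ∈ rest, isBracket x = true := fun x hx => hb x (List.mem_cons_of_mem c hx)
    have hc : isBracket c = true := hb c List.mem_cons_self
    by_cases h1 : c = '(' ∨ c = '[' ∨ c = '{'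
    · simp only [parLoop, if_pos h1] at h
      rcases ih hrest (c :: st) h with hadj | hno
      · left
        unfold hasAdj at hadj ⊢
        simp only [Bool.or_eq_true] at hadj ⊢
        rcases hadj with (h' | h') | h'
        · exact Or.inl (Or.inl (cadj_cons _ _ _ _ h'))
        · exact Or.inl (Or.inr (cadj_cons _ _ _ _ h'))
        · exact Or.inr (cadj_cons _ _ _ _ h')
      · cases rest with
        | nil => simp [parLoop] at h
        | cons d r2 =>
          have hd : isBracket d = true := hrest d List.mem_cons_self
          have hdno : isOpener d = false := by
            simp only [List.all_cons, Bool.and_eq_true] at hno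
            simpa using hno.1
          have hdcl : d = ')' ∨ d = '}' ∨ d = ']' := by
            simp only [isBracket, Bool.or_eq_true, decide_eq_true_eq] at hd
            simp only [isOpener, Bool.or_eq_false_iff, decide_eq_false_iff_not] at hdno
            tauto
          have hdnotop : ¬ (d = '(' ∨ d = '[' ∨ d = '{') := by
            simp only [isOpener, Bool.or_eq_false_iff, decide_eq_false_iff_not] at hdno
            tauto
          simp only [parLoop, if_neg hdnotop, if_pos hdcl] at h
          by_cases hm : c = rightOf d
          · left
            unfold hasAdj
            simp only [Bool.or_eq_true]
            rcases hdcl with hd' | hd' | hd' <;> subst hd' <;>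
              simp [rightOf] at hm <;> subst hm <;> simp [cadj]
          · simp only [if_neg hm] at h; exact absurd h (by simp)
    · by_cases h2 : c = ')' ∨ c = '}' ∨ c = ']'
      · cases st with
        | nil => simp only [parLoop, if_neg h1, if_pos h2] at h; exact absurd h (by simp)
        | cons top st' =>
          simp only [parLoop, if_neg h1, if_pos h2] at h
          by_cases ht : top = rightOf c
          · simp only [if_pos ht] at h
            rcases ih hrest st' h with hadj | hno
            · left
              unfold hasAdj at hadj ⊢
              simp only [Bool.or_eq_true] at hadj ⊢
              rcases hadj with (h' | h') | h'
              · exact Or.inl (Or.inl (cadj_cons _ _ _ _ h'))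
              · exact Or.inl (Or.inr (cadj_cons _ _ _ _ h'))
              · exact Or.inr (cadj_cons _ _ _ _ h')
            · right
              simp only [List.all_cons, Bool.and_eq_true]
              refine ⟨?_, hno⟩
              rcases h2 with h' | h' | h' <;> subst h' <;> simp [isOpener]
          · simp only [if_neg ht] at h; exact absurd h (by simp)
      · exact absurd hc (by simp only [isBracket, Bool.or_eq_true, decide_eq_true_eq]; tauto)

theorem repl_len_eq (a b : Char) (l : List Char) (h : (repl a b l).length = l.length) :
    repl a b l = l := by
  rcases repl_eq_or_lt a b l with h' | h'
  · exact h'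
  · omega

-- at a fixpoint of stepElim, every single pair-replace is the identity
theorem fix_repl (l : List Char) (hfix : stepElim l = l) :
    repl '(' ')' l = l ∧ repl '[' ']' l = l ∧ repl '{' '}' l = l := by
  have e1 := repl_length_le '(' ')' l
  have e2 := repl_length_le '[' ']' (repl '(' ')' l)
  have e3 := repl_length_le '{' '}' (repl '[' ']' (repl '(' ')' l))
  have hl : (stepElim l).length = l.length := by rw [hfix]
  unfold stepElim at hl
  have h1 : repl '(' ')' l = l := repl_len_eq _ _ _ (by omega)
  rw [h1] at hl e2 e3 ⊢
  have h2 : repl '[' ']' l = l := repl_len_eq _ _ _ (by omega)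
  rw [h2] at hl ⊢
  have h3 : repl '{' '}' l = l := repl_len_eq _ _ _ hl
  exact ⟨rfl, rfl, h3⟩

-- a nonempty bracket-only fixpoint fails A's scan
theorem fix_parLoop_false (l : List Char) (hne : l ≠ [])
    (hb : ∀ c ∈ l, isBracket c = true) (hfix : stepElim l = l) :
    parLoop l [] = false := by
  by_contra h
  have h' : parLoop l [] = true := by
    cases hx : parLoop l [] with
    | false => exact absurd hx h
    | true => rfl
  rcases parLoop_adj l hb [] h' with hadj | hno
  · obtain ⟨f1, f2, f3⟩ := fix_repl l hfix
    unfold hasAdj at hadj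
    simp only [Bool.or_eq_true] at hadj
    rcases hadj with (hx | hx) | hx
    · have := cadj_repl_lt _ _ _ hx; rw [f1] at this; omega
    · have := cadj_repl_lt _ _ _ hx; rw [f2] at this; omega
    · have := cadj_repl_lt _ _ _ hx; rw [f3] at this; omega
  · cases l with
    | nil => exact hne rfl
    | cons c rest =>
      have hc : isBracket c = true := hb c List.mem_cons_self
      have hcno : isOpener c = false := by
        simp only [List.all_cons, Bool.and_eq_true] at hno
        simpa using hno.1
      have h1 : ¬ (c = '(' ∨ c = '[' ∨ c = '{') := by
        simp only [isOpener, Bool.or_eq_false_iff, decide_eq_false_iff_not] at hcno; tauto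
      have h2 : c = ')' ∨ c = '}' ∨ c = ']' := by
        simp only [isBracket, Bool.or_eq_true, decide_eq_true_eq] at hc
        simp only [isOpener, Bool.or_eq_false_iff, decide_eq_false_iff_not] at hcno
        tauto
      simp only [parLoop, if_neg h1, if_pos h2] at h'
      exact absurd h' (by simp)

-- B's loop computes exactly A's scan result, on bracket-only input
theorem pairElimLoop_eq (l : List Char) (hb : ∀ c ∈ l, isBracket c = true) :
    (pairElimLoop l == []) = parLoop l [] := by
  fun_induction pairElimLoop l with
  | case1 l t hfix =>
    subst t
    cases hl : l with
    | nil => simp [parLoop, List.isEmpty]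
    | cons c rest =>
      rw [← hl]
      rw [fix_parLoop_false l (by rw [hl]; simp) hb hfix]
      simp [hl]
  | case2 l t hfix ih =>
    subst t
    have hbt : ∀ c ∈ stepElim l, isBracket c = true :=
      fun c hc => hb c ((stepElim_sublist l).mem hc)
    rw [ih hbt, parLoop_stepElim]

-- ===== VERDICT (by name: the statement is the Claim_ definition above) =====
theorem par_check_spec : Claim_equal_par_check := by
  intro val _
  unfold Spec_par_check par_check par_check_alt
  rw [pairElimLoop_eq _ (fun c hc => (List.mem_filter.mp hc).2), parLoop_filter]
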